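-- pv_equiv track=rewrite | github.com/sangderenard/Turing | src/transmogrifier/graph/graph_express2.py | sort_roles
-- ===== SOURCE A (Python) =====
-- def sort_roles(grouped):
--     """
--     Sort roles in the order: input, intermediate, output, followed by any remaining roles.
--     """
--     basics = ['input', 'intermediate', 'output']
--     ordered_keys = []
--     for lvl in sorted(grouped):
--         for typ in sorted(grouped[lvl]):
--             roles_present = list(grouped[lvl][typ].keys())
--             for role in basics:
--                 if role in grouped[lvl][typ]:
--                     ordered_keys.append((lvl, typ, role))
--             for role in sorted(roles_present):
--                 if role not in basics:
--                     ordered_keys.append((lvl, typ, role))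
--     return ordered_keys
-- ===== SOURCE B (Python) =====
-- def sort_roles(grouped):
--     """
--     Sort roles in the order: input, intermediate, output, followed by any remaining roles.
--     """
--     basics = ['input', 'intermediate', 'output']
--     key = lambda r: (basics.index(r) if r in basics else len(basics), r)
--     return [(lvl, typ, role)
--             for lvl in sorted(grouped)
--             for typ in sorted(grouped[lvl])
--             for role in sorted(grouped[lvl][typ], key=key)]
-- ===== Notes on version B (the rewrite author's own statement) =====
-- stated objective: simpler
-- what changed: The two inner passes (a priority scan over the basics list plus a filtered alphabetical pass over the remaining roles) are replaced by one keyed sort per (level,type) group using the tuple key (priority-index-or-3, role), and the explicit append loops become a single comprehension.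
import Mathlib
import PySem

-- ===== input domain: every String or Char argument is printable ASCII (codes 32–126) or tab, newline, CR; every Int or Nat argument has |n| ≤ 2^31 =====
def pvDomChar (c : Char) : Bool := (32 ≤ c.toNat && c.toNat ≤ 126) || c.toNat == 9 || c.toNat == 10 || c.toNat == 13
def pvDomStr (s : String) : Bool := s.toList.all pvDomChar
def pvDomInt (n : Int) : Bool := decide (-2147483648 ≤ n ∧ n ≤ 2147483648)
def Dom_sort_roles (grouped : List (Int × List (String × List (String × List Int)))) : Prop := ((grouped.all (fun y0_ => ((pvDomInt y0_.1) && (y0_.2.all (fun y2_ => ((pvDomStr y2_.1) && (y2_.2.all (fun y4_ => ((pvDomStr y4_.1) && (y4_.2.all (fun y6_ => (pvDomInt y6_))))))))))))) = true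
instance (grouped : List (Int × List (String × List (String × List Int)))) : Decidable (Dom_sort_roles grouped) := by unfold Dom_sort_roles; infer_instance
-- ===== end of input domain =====

-- B replaces A's two inner passes (priority scan over basics, then a filtered alphabetical pass)
-- with one priority-keyed sort per (level,type) group; objective: simpler (one comprehension).

-- ===== PORT A =====
-- the fixed priority list ['input', 'intermediate', 'output'] (the same literal appears in both Pythons)
def pvBasics : List String := ["input", "intermediate", "output"]

-- nested Python dicts are association lists here; each subscription grouped[lvl] / grouped[lvl][typ]
-- is PySem.Dict.ofList … .getD (lvl/typ always is a present key, so the [] default is never taken)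
def sort_roles (grouped : List (Int × List (String × List (String × List Int)))) : List (Int × String × String) :=
  (PySem.List.sorted (PySem.Dict.ofList grouped).keys (fun x => x)).foldl (fun acc lvl =>
    (PySem.List.sorted (PySem.Dict.ofList ((PySem.Dict.ofList grouped).getD lvl [])).keys (fun x => x)).foldl (fun acc2 typ =>
      (PySem.List.sorted (PySem.Dict.ofList ((PySem.Dict.ofList ((PySem.Dict.ofList grouped).getD lvl [])).getD typ [])).keys (fun x => x)).foldl
        (fun a role => if !pvBasics.contains role then a ++ [(lvl, typ, role)] else a)
        (pvBasics.foldl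
          (fun a role => if (PySem.Dict.ofList ((PySem.Dict.ofList ((PySem.Dict.ofList grouped).getD lvl [])).getD typ [])).contains role then a ++ [(lvl, typ, role)] else a)
          acc2)) acc) []

-- ===== PORT B =====
-- Source B's sort key (basics.index(r) if r in basics else len(basics), r): the Python tuple key is
-- ported as a single key into the lexicographic product order Lex (Int × String), which compares
-- exactly like Python's pair comparison (first component, then the string).
def pvPriv (r : String) : Int :=
  match PySem.List.index? pvBasics r with
  | some i => (i : Int)
  | none => (pvBasics.length : Int)

def pvKey (r : String) : Lex (Int × String) := toLex (pvPriv r, r)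

def sort_roles_alt (grouped : List (Int × List (String × List (String × List Int)))) : List (Int × String × String) :=
  (PySem.List.sorted (PySem.Dict.ofList grouped).keys (fun x => x)).flatMap (fun lvl =>
    (PySem.List.sorted (PySem.Dict.ofList ((PySem.Dict.ofList grouped).getD lvl [])).keys (fun x => x)).flatMap (fun typ =>
      (PySem.List.sorted (PySem.Dict.ofList ((PySem.Dict.ofList ((PySem.Dict.ofList grouped).getD lvl [])).getD typ [])).keys pvKey).map
        (fun role => (lvl, typ, role))))

-- ===== PRECONDITION & SPEC =====
def Spec_sort_roles (grouped : List (Int × List (String × List (String × List Int)))) (out : List (Int × String × String)) : Prop := out = sort_roles_alt grouped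
instance (grouped : List (Int × List (String × List (String × List Int)))) (out : List (Int × String × String)) : Decidable (Spec_sort_roles grouped out) := by unfold Spec_sort_roles; infer_instance

-- ===== CLAIM (what is proved, stated in full; the proofs are below) =====
def Claim_equal_sort_roles : Prop := ∀ (grouped : List (Int × List (String × List (String × List Int)))), Dom_sort_roles grouped → Spec_sort_roles grouped (sort_roles grouped)

-- ===== LEMMAS AND PROOFS =====

-- a foldl that appends a block per element is a flatMap
theorem pv_foldl_eq_flatMap {α β : Type} (f : List β → α → List β) (g : α → List β)
    (h : ∀ acc x, f acc x = acc ++ g x) :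
    ∀ (l : List α) (acc : List β), l.foldl f acc = acc ++ l.flatMap g := by
  intro l
  induction l with
  | nil => intro acc; simp
  | cons x t ih => intro acc; simp [List.foldl, h, ih, List.flatMap_cons]

theorem pvPri_of_not_mem (r : String) (h : r ∉ pvBasics) : pvPriv r = 3 := by
  have hnone : PySem.List.index? pvBasics r = none := by
    simp only [PySem.List.index?, List.idxOf?_eq_none_iff]
    intro hc
    exact absurd (by simpa using hc) h
  rw [pvPriv, hnone]; decide

-- the heart of the equivalence: for a duplicate-free role list, B's single priority-keyed sort
-- equals A's (present basics in priority order) ++ (remaining roles alphabetically)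
theorem pv_block_eq (rs : List String) (hnd : rs.Nodup) (q : String → Bool)
    (hq : ∀ r, q r = true ↔ r ∈ rs) :
    pvBasics.filter q ++ (PySem.List.sorted rs (fun x => x)).filter (fun r => !pvBasics.contains r)
      = PySem.List.sorted rs pvKey := by
  apply Eq.symm
  apply PySem.List.sorted_eq_of_perm_of_pairwise_lt
  · -- permutation of rs
    have h1 : (pvBasics.filter q).Perm (rs.filter (fun r => pvBasics.contains r)) := by
      rw [List.perm_ext_iff_of_nodup (List.Nodup.filter _ (by decide)) (List.Nodup.filter _ hnd)]
      intro a
      simp [List.mem_filter, hq]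
      tauto
    have h2 : ((PySem.List.sorted rs (fun x => x)).filter (fun r => !pvBasics.contains r)).Perm
        (rs.filter (fun r => !pvBasics.contains r)) :=
      (PySem.List.sorted_perm rs (fun x => x) false).filter _
    exact (h1.append h2).trans (List.filter_append_perm _ rs)
  · -- strictly increasing under pvKey
    rw [List.pairwise_append]
    refine ⟨?_, ?_, ?_⟩
    · -- basics part: distinct increasing priorities
      exact List.Pairwise.sublist List.filter_sublist
        (show List.Pairwise (fun a b => pvKey a < pvKey b) pvBasics by decide)
    · -- remaining roles: all priority 3, strictly increasing alphabetically
      have hs : (PySem.List.sorted rs (fun x => x)).Pairwise (fun a b => a < b) := by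
        have hle := PySem.List.sorted_pairwise rs (fun x => x)
        have hne : (PySem.List.sorted rs (fun x => x)).Pairwise (fun a b => a ≠ b) :=
          ((PySem.List.sorted_perm rs (fun x => x) false).nodup_iff.mpr hnd)
        exact (hle.and hne).imp (fun h => lt_of_le_of_ne h.1 h.2)
      apply (List.Pairwise.sublist List.filter_sublist hs).imp_of_mem
      intro a b ha hb hab
      have ha3 := pvPri_of_not_mem a (by
        have := (List.mem_filter.mp ha).2; simpa using this)
      have hb3 := pvPri_of_not_mem b (by
        have := (List.mem_filter.mp hb).2; simpa using this)
      rw [Prod.Lex.lt_iff]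
      exact Or.inr ⟨by simp [pvKey, ha3, hb3], by simpa [pvKey] using hab⟩
    · -- every present basic role precedes every non-basic role
      intro a ha b hb
      have ha' : a ∈ pvBasics := (List.mem_filter.mp ha).1
      have hb3 := pvPri_of_not_mem b (by
        have := (List.mem_filter.mp hb).2; simpa using this)
      rw [Prod.Lex.lt_iff]
      left
      have hsmall : ∀ a ∈ pvBasics, pvPriv a < 3 := by decide
      simpa [pvKey, hb3] using hsmall a ha'

-- A's inner two loops over one (lvl, typ) group produce exactly B's keyed sort, appended to acc
theorem pv_group_eq (lvl : Int) (typ : String) (dt : PySem.Dict String (List Int))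
    (hnd : dt.keys.Nodup) (acc : List (Int × String × String)) :
    (PySem.List.sorted dt.keys (fun x => x)).foldl
      (fun a role => if !pvBasics.contains role then a ++ [(lvl, typ, role)] else a)
      (pvBasics.foldl (fun a role => if dt.contains role then a ++ [(lvl, typ, role)] else a) acc)
    = acc ++ (PySem.List.sorted dt.keys pvKey).map (fun role => (lvl, typ, role)) := by
  rw [PySem.List.foldl_append_if, PySem.List.foldl_append_if, List.append_assoc, ← List.map_append,
      pv_block_eq dt.keys hnd dt.contains (fun r => PySem.Dict.contains_iff_mem_keys dt r)]

-- ===== VERDICT (by name: the statement is the Claim_ definition above) =====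
theorem sort_roles_spec : Claim_equal_sort_roles := by
  intro grouped _
  unfold Spec_sort_roles sort_roles sort_roles_alt
  refine (pv_foldl_eq_flatMap _ _ ?_ _ []).trans (List.nil_append _)
  intro acc lvl
  refine (pv_foldl_eq_flatMap _ _ ?_ _ acc)
  intro acc2 typ
  exact pv_group_eq lvl typ _ (PySem.Dict.nodup_keys_ofList _) acc2
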